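-- pv_equiv track=rewrite | github.com/hdelei/alarme-intelbras | alarmeitbl/utils_proto.py | contact_id_encode
-- ===== SOURCE A (Python) =====
-- def contact_id_encode(number, length):
--     number = abs(number)
--     buf = []
--     for i in range(0, length):
--         digit = number % 10
--         number //= 10
--         if not digit:
--             digit = 0x0a
--         buf = [digit] + buf
--     return buf
-- ===== SOURCE B (Python) =====
-- def contact_id_encode(number, length):
--     n = abs(number)
--     return [(n // 10 ** (length - 1 - i)) % 10 or 0x0a for i in range(length)]
-- ===== Notes on version B (the rewrite author's own statement) =====
-- stated objective: alternative
-- what changed: B computes each output digit directly by position with a closed-form (n // 10**(length-1-i)) % 10 in a single forward comprehension, instead of A's stateful loop that repeatedly divides a running number and prepends to the front of a list.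
import Mathlib
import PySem

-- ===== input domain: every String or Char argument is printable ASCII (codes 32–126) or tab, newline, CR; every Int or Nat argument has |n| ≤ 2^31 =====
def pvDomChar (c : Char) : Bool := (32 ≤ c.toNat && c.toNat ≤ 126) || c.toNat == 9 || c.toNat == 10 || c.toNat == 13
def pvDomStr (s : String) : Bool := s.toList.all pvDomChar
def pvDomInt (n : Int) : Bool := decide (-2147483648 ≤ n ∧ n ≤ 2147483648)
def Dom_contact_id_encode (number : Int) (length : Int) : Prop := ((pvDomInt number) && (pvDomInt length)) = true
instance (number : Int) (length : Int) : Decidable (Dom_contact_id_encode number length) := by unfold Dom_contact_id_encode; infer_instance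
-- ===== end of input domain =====

-- B replaces A's stateful divide-and-prepend loop by a stateless per-position closed form (alternative decomposition, not faster).


-- ===== PORT A =====
def contact_id_encode (number : Int) (length : Int) : List Int :=
  let number := |number|
  let st := (PySem.List.pyRange 0 length 1).foldl
    (fun (s : Int × List Int) _i =>
      let digit := PySem.Int.mod s.1 10
      let number := PySem.Int.floordiv s.1 10
      let digit := if digit = 0 then (0x0a : Int) else digit
      (number, [digit] ++ s.2)) (number, [])
  st.2

-- ===== PORT B =====
-- 10 ** (length - 1 - i): for i in range(length) the exponent is nonnegative, so .toNat is exact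
def contact_id_encode_alt (number : Int) (length : Int) : List Int :=
  let n := |number|
  (PySem.List.pyRange 0 length 1).map (fun i =>
    let d := PySem.Int.mod (PySem.Int.floordiv n ((10:Int) ^ (length - 1 - i).toNat)) 10
    if d = 0 then (0x0a : Int) else d)

-- ===== PRECONDITION & SPEC =====
def Spec_contact_id_encode (number : Int) (length : Int) (out : List Int) : Prop := out = contact_id_encode_alt number length
instance (number : Int) (length : Int) (out : List Int) : Decidable (Spec_contact_id_encode number length out) := by unfold Spec_contact_id_encode; infer_instance

-- ===== CLAIM (what is proved, stated in full; the proofs are below) =====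
def Claim_equal_contact_id_encode : Prop := ∀ (number : Int) (length : Int), Dom_contact_id_encode number length → Spec_contact_id_encode number length (contact_id_encode number length)

-- ===== LEMMAS AND PROOFS =====

-- A's loop invariant: after L iterations the running number is n / 10^L and the
-- buffer is the reverse of the encoded digits in processing order (least significant first).
theorem pv_loopA (n : Int) (L : Nat) :
    (List.range L).foldl
      (fun (s : Int × List Int) _i =>
        (PySem.Int.floordiv s.1 10,
         [if PySem.Int.mod s.1 10 = 0 then (0x0a : Int) else PySem.Int.mod s.1 10] ++ s.2))
      (n, [])
    = (PySem.Int.floordiv n ((10:Int) ^ L),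
       ((List.range L).map (fun j =>
         let d := PySem.Int.mod (PySem.Int.floordiv n ((10:Int) ^ j)) 10
         if d = 0 then (0x0a : Int) else d)).reverse) := by
  induction L with
  | zero => simp [PySem.Int.floordiv_eq_ediv_of_pos]
  | succ L ih =>
      conv_lhs => rw [List.range_succ]
      rw [List.foldl_append, ih]
      simp only [List.foldl_cons, List.foldl_nil, Prod.mk.injEq]
      refine ⟨?_, ?_⟩
      · rw [PySem.Int.floordiv_eq_ediv_of_pos (by norm_num : (0:Int) < 10),
            PySem.Int.floordiv_eq_ediv_of_pos (by norm_num : (0:Int) < (10:Int) ^ L),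
            PySem.Int.floordiv_eq_ediv_of_pos (by norm_num : (0:Int) < (10:Int) ^ (L+1)),
            pow_succ, ← Int.ediv_ediv_eq_ediv_mul]
        positivity
      · rw [List.range_succ]
        simp [List.map_append, List.reverse_append]

-- reversing a map over an index range flips the index
theorem pv_rev_map (F : Nat → Int) (L : Nat) :
    ((List.range L).map F).reverse = (List.range L).map (fun i => F (L - 1 - i)) := by
  apply List.ext_getElem
  · simp
  · intro i h1 h2
    simp only [List.getElem_reverse, List.getElem_map, List.getElem_range,
      List.length_map, List.length_range]

theorem contact_id_encode_eq_alt (number : Int) (length : Int) :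
    contact_id_encode number length = contact_id_encode_alt number length := by
  unfold contact_id_encode contact_id_encode_alt
  rw [PySem.List.pyRange_one]
  simp only [Int.sub_zero, List.foldl_map, List.map_map]
  rw [pv_loopA |number| length.toNat, pv_rev_map]
  apply List.map_congr_left
  intro i hi
  have hi' : i < length.toNat := List.mem_range.mp hi
  have he : (length - 1 - ((0:Int) + (i:Int))).toNat = length.toNat - 1 - i := by omega
  simp only [Function.comp_apply, he]

-- ===== VERDICT (by name: the statement is the Claim_ definition above) =====
theorem contact_id_encode_spec : Claim_equal_contact_id_encode := by
  intro number length _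
  exact contact_id_encode_eq_alt number length
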